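-- pv_equiv track=rewrite | github.com/cristijiru/dixi_ma_bunu | scraper/fix_split_examples.py | fix_examples
-- ===== SOURCE A (Python) =====
-- def count_parens(s: str) -> int:
--     """Count unmatched parentheses. Positive = more open, negative = more close."""
--     balance = 0
--     for c in s:
--         if c == '(':
--             balance += 1
--         elif c == ')':
--             balance -= 1
--     return balance
--
-- def fix_examples(examples: list[str]) -> tuple[list[str], bool]:
--     """Merge incorrectly split examples. Returns (fixed_list, was_changed)."""
--     if not examples or len(examples) < 2:
--         return examples, False
--
--     fixed = []
--     i = 0
--     changed = False
--
--     while i < len(examples):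
--         current = examples[i]
--         balance = count_parens(current)
--
--         if balance > 0:  # More opening than closing - need to merge
--             parts = [current]
--             j = i + 1
--             while j < len(examples) and balance > 0:
--                 parts.append(examples[j])
--                 balance += count_parens(examples[j])
--                 j += 1
--
--             if len(parts) > 1:
--                 # Merge with "; " separator (restoring original)
--                 merged = "; ".join(parts)
--                 fixed.append(merged)
--                 changed = True
--                 i = j
--                 continue
--
--         fixed.append(current)
--         i += 1
--
--     return fixed, changed
-- ===== SOURCE B (Python) =====
-- def count_parens(s: str) -> int:
--     """Count unmatched parentheses. Positive = more open, negative = more close."""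
--     balance = 0
--     for c in s:
--         if c == '(':
--             balance += 1
--         elif c == ')':
--             balance -= 1
--     return balance
--
-- def fix_examples(examples: list[str]) -> tuple[list[str], bool]:
--     """Merge incorrectly split examples. Returns (fixed_list, was_changed)."""
--     if len(examples) < 2:
--         return examples, False
--
--     fixed = []
--     pending = []          # buffer of parts of a merge in progress
--     balance = 0           # running paren balance of the buffer
--     changed = False
--
--     for item in examples:
--         if not pending:
--             balance = count_parens(item)
--             if balance > 0:
--                 pending = [item]
--             else:
--                 fixed.append(item)
--         else:
--             pending.append(item)
--             balance += count_parens(item)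
--             if balance <= 0:
--                 fixed.append("; ".join(pending))
--                 changed = True
--                 pending = []
--
--     if pending:
--         if len(pending) > 1:
--             fixed.append("; ".join(pending))
--             changed = True
--         else:
--             fixed.append(pending[0])
--
--     return fixed, changed
-- ===== Notes on version B (the rewrite author's own statement) =====
-- stated objective: simpler
-- what changed: Replaced the index-jumping outer while loop with an inner while (i=j continue) by a single linear pass that keeps a pending buffer and a running paren balance, flushing the buffer when the balance closes or at the end.
import Mathlib
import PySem

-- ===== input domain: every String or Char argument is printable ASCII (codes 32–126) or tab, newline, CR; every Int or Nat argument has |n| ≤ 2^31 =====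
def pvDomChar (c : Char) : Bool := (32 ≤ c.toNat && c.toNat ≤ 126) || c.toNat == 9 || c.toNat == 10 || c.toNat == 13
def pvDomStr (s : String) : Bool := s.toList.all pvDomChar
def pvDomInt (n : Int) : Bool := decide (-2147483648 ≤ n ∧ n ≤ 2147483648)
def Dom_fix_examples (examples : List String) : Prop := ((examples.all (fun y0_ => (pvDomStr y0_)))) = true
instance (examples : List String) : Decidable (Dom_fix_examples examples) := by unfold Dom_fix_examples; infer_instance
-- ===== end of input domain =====

-- B replaces A's index-jumping outer-while/inner-while with one linear pass over the list
-- keeping a pending buffer and a running paren balance (objective: simpler).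

-- ===== PORT A =====

-- count_parens: char-by-char balance loop
def countParens (s : String) : Int :=
  s.toList.foldl (fun balance c =>
    if c = '(' then balance + 1 else if c = ')' then balance - 1 else balance) 0

-- inner while loop: consumes following elements while j < len and balance > 0;
-- returns (parts, remaining elements, final balance)
def fixInnerA : Int → List String → List String → List String × List String × Int
  | bal, [], parts => (parts, [], bal)
  | bal, x :: xs, parts =>
      if bal > 0 then fixInnerA (bal + countParens x) xs (parts ++ [x])
      else (parts, x :: xs, bal)

-- termination fact for the outer loop (cited by decreasing_by below)
theorem fixInnerA_rest_len (bal : Int) (rest parts : List String) :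
    (fixInnerA bal rest parts).2.1.length ≤ rest.length := by
  induction rest generalizing bal parts with
  | nil => simp [fixInnerA]
  | cons x xs ih =>
      simp only [fixInnerA]
      split
      · exact le_trans (ih _ _) (Nat.le_succ _)
      · simp

-- outer while loop over the index i, as recursion on the remaining suffix
def fixOuterA : List String → List String → Bool → List String × Bool
  | [], fixed, changed => (fixed, changed)
  | current :: xs, fixed, changed =>
      let balance := countParens current
      if balance > 0 then
        let r := fixInnerA balance xs [current]
        if r.1.length > 1 then
          fixOuterA r.2.1 (fixed ++ [PySem.Str.join "; " r.1]) true
        else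
          fixOuterA xs (fixed ++ [current]) changed
      else
        fixOuterA xs (fixed ++ [current]) changed
termination_by rest _ _ => rest.length
decreasing_by
  · exact Nat.lt_succ_of_le (fixInnerA_rest_len _ _ _)
  · simp
  · simp

def fix_examples (examples : List String) : List String × Bool :=
  if examples.length < 2 then (examples, false)
  else fixOuterA examples [] false

-- ===== PORT B =====

-- count_parens (B's own copy of the same char-by-char helper)
def countParensB (s : String) : Int :=
  s.toList.foldl (fun balance c =>
    if c = '(' then balance + 1 else if c = ')' then balance - 1 else balance) 0

-- single linear pass with a pending buffer and a running balance; on exhaustion,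
-- flush the buffer (merging only if it holds more than one part)
def fixLoopB : List String → List String → List String → Int → Bool → List String × Bool
  | [], fixed, pending, _bal, changed =>
      if pending = [] then (fixed, changed)
      else if pending.length > 1 then (fixed ++ [PySem.Str.join "; " pending], true)
      else (fixed ++ pending, changed)
  | item :: rest, fixed, pending, bal, changed =>
      if pending = [] then
        let b := countParensB item
        if b > 0 then fixLoopB rest fixed [item] b changed
        else fixLoopB rest (fixed ++ [item]) [] b changed
      else
        let b := bal + countParensB item
        if b ≤ 0 then
          fixLoopB rest (fixed ++ [PySem.Str.join "; " (pending ++ [item])]) [] b true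
        else
          fixLoopB rest fixed (pending ++ [item]) b changed

def fix_examples_alt (examples : List String) : List String × Bool :=
  if examples.length < 2 then (examples, false)
  else fixLoopB examples [] [] 0 false

-- ===== PRECONDITION & SPEC =====
def Spec_fix_examples (examples : List String) (out : List String × Bool) : Prop := out = fix_examples_alt examples
instance (examples : List String) (out : List String × Bool) : Decidable (Spec_fix_examples examples out) := by unfold Spec_fix_examples; infer_instance

-- ===== CLAIM (what is proved, stated in full; the proofs are below) =====
def Claim_equal_fix_examples : Prop := ∀ (examples : List String), Dom_fix_examples examples → Spec_fix_examples examples (fix_examples examples)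

-- ===== LEMMAS AND PROOFS =====

-- the two count_parens helpers are the same function
theorem countParens_eq (s : String) : countParens s = countParensB s := rfl

-- when the balance is not positive, the inner loop consumes nothing
theorem fixInnerA_notpos (bal : Int) (rest parts : List String) (h : ¬ bal > 0) :
    fixInnerA bal rest parts = (parts, rest, bal) := by
  cases rest with
  | nil => simp [fixInnerA]
  | cons x xs => simp [fixInnerA, h]

-- parts only grows
theorem fixInnerA_parts_len (bal : Int) (rest parts : List String) :
    parts.length ≤ (fixInnerA bal rest parts).1.length := by
  induction rest generalizing bal parts with
  | nil => simp [fixInnerA]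
  | cons x xs ih =>
      simp only [fixInnerA]
      split
      · exact le_trans (by simp) (ih _ _)
      · simp

-- if the final balance is positive, the whole rest was consumed
theorem fixInnerA_pos_rest (bal : Int) (rest parts : List String)
    (h : 0 < (fixInnerA bal rest parts).2.2) : (fixInnerA bal rest parts).2.1 = [] := by
  induction rest generalizing bal parts with
  | nil => simp [fixInnerA]
  | cons x xs ih =>
      by_cases hb : bal > 0
      · simp only [fixInnerA, if_pos hb] at h ⊢
        exact ih _ _ h
      · simp [fixInnerA, hb] at h

-- if the final balance closed (≤ 0) and we started open (> 0), something was consumed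
theorem fixInnerA_close (bal : Int) (rest parts : List String)
    (hb : 0 < bal) (h : (fixInnerA bal rest parts).2.2 ≤ 0) :
    parts.length < (fixInnerA bal rest parts).1.length := by
  cases rest with
  | nil => simp [fixInnerA] at h; omega
  | cons x xs =>
      simp only [fixInnerA, if_pos hb] at h ⊢
      calc parts.length < (parts ++ [x]).length := by simp
        _ ≤ _ := fixInnerA_parts_len _ _ _

-- if parts did not grow, the rest was empty (given positive entry balance)
theorem fixInnerA_stuck (bal : Int) (rest parts : List String)
    (hb : 0 < bal) (h : (fixInnerA bal rest parts).1.length ≤ parts.length) :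
    rest = [] := by
  cases rest with
  | nil => rfl
  | cons x xs =>
      exfalso
      simp only [fixInnerA, if_pos hb] at h
      have h1 := fixInnerA_parts_len (bal + countParens x) xs (parts ++ [x])
      simp at h1
      omega

-- accumulating-state correspondence: the B loop with a non-empty pending buffer and
-- positive balance behaves as A's inner while loop followed by the appropriate action
theorem loopB_accum (rest : List String) :
    ∀ (fixed pending : List String) (bal : Int) (changed : Bool),
      0 < bal → pending ≠ [] →
      fixLoopB rest fixed pending bal changed =
        (let r := fixInnerA bal rest pending
         if r.2.2 ≤ 0 then
           fixLoopB r.2.1 (fixed ++ [PySem.Str.join "; " r.1]) [] r.2.2 true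
         else if r.1.length > 1 then (fixed ++ [PySem.Str.join "; " r.1], true)
         else (fixed ++ r.1, changed)) := by
  induction rest with
  | nil =>
      intro fixed pending bal changed hb hp
      simp [fixLoopB, fixInnerA, hp, not_le.mpr hb]
  | cons x xs ih =>
      intro fixed pending bal changed hb hp
      simp only [fixLoopB, if_neg hp, fixInnerA, if_pos hb, countParens_eq]
      by_cases hble : bal + countParensB x ≤ 0
      · rw [if_pos hble]
        rw [fixInnerA_notpos _ _ _ (by omega)]
        simp [hble]
      · rw [if_neg hble]
        rw [ih fixed (pending ++ [x]) _ changed (by omega) (by simp)]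

-- main correspondence: A's outer loop equals B's loop in the non-accumulating state
theorem outerA_eq_loopB :
    ∀ (n : Nat) (rest : List String), rest.length ≤ n →
      ∀ (fixed : List String) (bal : Int) (changed : Bool),
        fixOuterA rest fixed changed = fixLoopB rest fixed [] bal changed := by
  intro n
  induction n with
  | zero =>
      intro rest hn fixed bal changed
      have : rest = [] := List.length_eq_zero_iff.mp (Nat.le_zero.mp hn)
      subst this
      simp [fixOuterA, fixLoopB]
  | succ n ih =>
      intro rest hn fixed bal changed
      cases rest with
      | nil => simp [fixOuterA, fixLoopB]
      | cons current xs =>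
          have hxs : xs.length ≤ n := by simpa using hn
          simp only [fixOuterA, fixLoopB]
          by_cases hb : countParens current > 0
          · rw [if_pos hb]
            rw [← countParens_eq, if_pos hb]
            rw [loopB_accum xs fixed [current] _ changed hb (by simp)]
            set r := fixInnerA (countParens current) xs [current] with hr
            by_cases hclose : r.2.2 ≤ 0
            · have hlen : 1 < r.1.length := by
                have := fixInnerA_close (countParens current) xs [current] hb hclose
                simpa using this
              simp only [hclose, if_pos, hlen]
              have hr1 : r.2.1.length ≤ n :=
                le_trans (fixInnerA_rest_len _ _ _) hxs
              exact ih r.2.1 hr1 _ _ _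
            · rw [if_neg hclose]
              have hpos : 0 < r.2.2 := by omega
              by_cases hlen : r.1.length > 1
              · rw [if_pos hlen, if_pos hlen]
                have hrest : r.2.1 = [] := fixInnerA_pos_rest _ _ _ hpos
                have := fixInnerA_rest_len (countParens current) xs [current]
                rw [hrest]
                simp [fixOuterA]
              · rw [if_neg hlen, if_neg hlen]
                have hstuck : xs = [] :=
                  fixInnerA_stuck (countParens current) xs [current] hb (by simpa using not_lt.mp hlen)
                subst hstuck
                have : r = ([current], [], countParens current) := by
                  rw [hr]; simp [fixInnerA]
                rw [this]
                simp [fixOuterA]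
          · rw [if_neg hb, ← countParens_eq, if_neg hb]
            exact ih xs hxs _ _ _

-- ===== VERDICT (by name: the statement is the Claim_ definition above) =====
theorem fix_examples_spec : Claim_equal_fix_examples := by
  intro examples _
  unfold Spec_fix_examples fix_examples fix_examples_alt
  split
  · rfl
  · exact outerA_eq_loopB examples.length examples le_rfl [] 0 false
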